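-- pv_equiv track=rewrite | github.com/zadorian/SEARCH_ENGINEER | BACKEND/modules/cymonides/agent/config/canonical_standards.py | get_node_class
-- ===== SOURCE A (Python) =====
-- NODE_CLASSES = {
--     "SUBJECT": {
--         "description": "Entities and concepts being investigated",
--         "color": "#16a34a",  # Green
--         "axis": "Y",
--         "types": {
--             "ENTITY": [
--                 "person", "company", "organization", "email", "phone",
--                 "username", "domain", "url", "ip_address", "document",
--                 "vehicle", "vessel", "aircraft", "property", "crypto_wallet",
--                 "bank_account", "password"
--             ],
--             "CONCEPT": ["litigation", "phenomenon", "topic", "theme"]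
--         },
--         "sub_dimensions": ["ENTITY", "IDENTIFIER", "CLASSIFIER", "CONCEPT"]
--     },
--     "LOCATION": {
--         "description": "Geographic and jurisdictional context",
--         "color": "#ffffff",  # White
--         "axis": "X",
--         "types": {
--             "GEOGRAPHIC": ["coordinates", "region", "city", "country", "address"],
--             "JURISDICTIONAL": ["jurisdiction", "regulatory_zone"],
--             "SOURCE": ["aggregator", "registry", "breach", "platform", "database", "archive"],
--             "TEMPORAL": ["date", "year", "month", "period", "timestamp"],
--             "FORMAT": ["filetype", "mime_type", "language"],
--             "CATEGORY": ["news", "corporate", "government", "academic", "social"]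
--         },
--         "sub_dimensions": ["GEO", "TEMPORAL", "SOURCE", "FORMAT", "LANG", "CATEG"]
--     },
--     "NEXUS": {
--         "description": "Relationships/edges between entities",
--         "color": "#a855f7",  # Purple
--         "axis": "R",
--         "types": {
--             "RELATIONSHIP": "All relationship types from relationships.json"
--         },
--         "root_relationships": [
--             "same_as", "related_to", "owns", "controls", "member_of",
--             "located_at", "has", "links_to", "party_to", "sanctioned_by",
--             "appears_in", "regulated_by", "transacts_with", "searched_with",
--             "part_of", "tagged_with", "has_result"
--         ]
--     },
--     "NARRATIVE": {
--         "description": "Documentation and coordination",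
--         "color": "#2563eb",  # Blue
--         "axis": "N",
--         "types": {
--             "DOCUMENTATION": [
--                 "project", "report", "note", "chat", "tag",
--                 "finding", "workstream", "evidence_document"
--             ]
--         },
--         "sub_dimensions": ["project", "goals", "notes", "tags", "evidence"]
--     }
-- }
--
-- def get_node_class(node_type: str) -> str:
--     """Determine node class from type."""
--     for class_name, class_def in NODE_CLASSES.items():
--         for type_category, types in class_def.get("types", {}).items():
--             if isinstance(types, list) and node_type in types:
--                 return class_name
--             elif isinstance(types, str) and node_type == types:
--                 return class_name
--     return "SUBJECT"  # Default
-- ===== SOURCE B (Python) =====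
-- # Each class's type strings flattened into one frozenset (category keys are irrelevant
-- # to classification); classification is an early-return membership chain in the same
-- # class order as NODE_CLASSES, ending in the "SUBJECT" default.
--
-- SUBJECT_TYPES = frozenset([
--     "person", "company", "organization", "email", "phone",
--     "username", "domain", "url", "ip_address", "document",
--     "vehicle", "vessel", "aircraft", "property", "crypto_wallet",
--     "bank_account", "password",
--     "litigation", "phenomenon", "topic", "theme",
-- ])
--
-- LOCATION_TYPES = frozenset([
--     "coordinates", "region", "city", "country", "address",
--     "jurisdiction", "regulatory_zone",
--     "aggregator", "registry", "breach", "platform", "database", "archive",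
--     "date", "year", "month", "period", "timestamp",
--     "filetype", "mime_type", "language",
--     "news", "corporate", "government", "academic", "social",
-- ])
--
-- NEXUS_TYPES = frozenset([
--     "All relationship types from relationships.json",  # the str-valued RELATIONSHIP sentinel
-- ])
--
-- NARRATIVE_TYPES = frozenset([
--     "project", "report", "note", "chat", "tag",
--     "finding", "workstream", "evidence_document",
-- ])
--
-- def get_node_class(node_type: str) -> str:
--     """Determine node class from type."""
--     if node_type in SUBJECT_TYPES:
--         return "SUBJECT"
--     if node_type in LOCATION_TYPES:
--         return "LOCATION"
--     if node_type in NEXUS_TYPES: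
--         return "NEXUS"
--     if node_type in NARRATIVE_TYPES:
--         return "NARRATIVE"
--     return "SUBJECT"  # Default
-- ===== Notes on version B (the rewrite author's own statement) =====
-- stated objective: simpler
-- what changed: Replaces the per-call nested scan over the NODE_CLASSES dict-of-dicts by four flat per-class frozensets (category structure discarded, the str-valued NEXUS sentinel included) and a plain early-return membership chain; correct because no type string occurs in two classes.
import Mathlib
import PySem

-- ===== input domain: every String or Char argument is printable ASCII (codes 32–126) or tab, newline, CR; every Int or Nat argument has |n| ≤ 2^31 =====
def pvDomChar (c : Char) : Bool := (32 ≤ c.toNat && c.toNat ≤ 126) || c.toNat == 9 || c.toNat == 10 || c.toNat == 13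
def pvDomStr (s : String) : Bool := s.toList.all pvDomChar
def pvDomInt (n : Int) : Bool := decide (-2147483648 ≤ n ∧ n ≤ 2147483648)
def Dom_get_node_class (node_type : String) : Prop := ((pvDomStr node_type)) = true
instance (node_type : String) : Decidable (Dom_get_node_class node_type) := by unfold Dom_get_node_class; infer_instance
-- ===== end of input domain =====

-- B flattens each class's types into one frozenset and classifies with an early-return
-- membership chain (simpler); correct because no type string occurs in two classes.

-- ===== PORT A =====
-- A type category's value is either a list of type strings or a single string (the NEXUS sentinel).
inductive TypesVal where
  | lst : List String → TypesVal
  | str : String → TypesVal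
deriving DecidableEq, Repr

-- NODE_CLASSES, keeping only each class_def's "types" mapping: the other entries (description,
-- color, axis, sub_dimensions, root_relationships) are never read by get_node_class, and every
-- class has a "types" key, so class_def.get("types", {}) is exactly this list.
def NODE_CLASSES : List (String × List (String × TypesVal)) := [
  ("SUBJECT", [
    ("ENTITY", .lst ["person", "company", "organization", "email", "phone",
      "username", "domain", "url", "ip_address", "document",
      "vehicle", "vessel", "aircraft", "property", "crypto_wallet",
      "bank_account", "password"]),
    ("CONCEPT", .lst ["litigation", "phenomenon", "topic", "theme"])]),
  ("LOCATION", [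
    ("GEOGRAPHIC", .lst ["coordinates", "region", "city", "country", "address"]),
    ("JURISDICTIONAL", .lst ["jurisdiction", "regulatory_zone"]),
    ("SOURCE", .lst ["aggregator", "registry", "breach", "platform", "database", "archive"]),
    ("TEMPORAL", .lst ["date", "year", "month", "period", "timestamp"]),
    ("FORMAT", .lst ["filetype", "mime_type", "language"]),
    ("CATEGORY", .lst ["news", "corporate", "government", "academic", "social"])]),
  ("NEXUS", [
    ("RELATIONSHIP", .str "All relationship types from relationships.json")]),
  ("NARRATIVE", [
    ("DOCUMENTATION", .lst ["project", "report", "note", "chat", "tag",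
      "finding", "workstream", "evidence_document"])])]

-- inner loop of A: for type_category, types in class_def.get("types", {}).items(): …
def scanTypes (node_type class_name : String) : List (String × TypesVal) → Option String
  | [] => none
  | (_, .lst xs) :: rest =>
      if node_type ∈ xs then some class_name else scanTypes node_type class_name rest
  | (_, .str t) :: rest =>
      if node_type == t then some class_name else scanTypes node_type class_name rest

-- outer loop of A: for class_name, class_def in NODE_CLASSES.items(): …
def scanClasses (node_type : String) : List (String × List (String × TypesVal)) → String
  | [] => "SUBJECT"  -- Default
  | (class_name, class_def) :: rest =>
      match scanTypes node_type class_name class_def with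
      | some c => c
      | none => scanClasses node_type rest

def get_node_class (node_type : String) : String := scanClasses node_type NODE_CLASSES

-- ===== PORT B =====
def SUBJECT_TYPES : PySem.Set String := PySem.Set.ofList [
  "person", "company", "organization", "email", "phone",
  "username", "domain", "url", "ip_address", "document",
  "vehicle", "vessel", "aircraft", "property", "crypto_wallet",
  "bank_account", "password",
  "litigation", "phenomenon", "topic", "theme"]

def LOCATION_TYPES : PySem.Set String := PySem.Set.ofList [
  "coordinates", "region", "city", "country", "address",
  "jurisdiction", "regulatory_zone",
  "aggregator", "registry", "breach", "platform", "database", "archive",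
  "date", "year", "month", "period", "timestamp",
  "filetype", "mime_type", "language",
  "news", "corporate", "government", "academic", "social"]

def NEXUS_TYPES : PySem.Set String := PySem.Set.ofList [
  "All relationship types from relationships.json"]

def NARRATIVE_TYPES : PySem.Set String := PySem.Set.ofList [
  "project", "report", "note", "chat", "tag",
  "finding", "workstream", "evidence_document"]

def get_node_class_alt (node_type : String) : String :=
  if node_type ∈ SUBJECT_TYPES then "SUBJECT"
  else if node_type ∈ LOCATION_TYPES then "LOCATION"
  else if node_type ∈ NEXUS_TYPES then "NEXUS"
  else if node_type ∈ NARRATIVE_TYPES then "NARRATIVE"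
  else "SUBJECT"  -- Default

-- ===== PRECONDITION & SPEC =====
def Spec_get_node_class (node_type : String) (out : String) : Prop := out = get_node_class_alt node_type
instance (node_type : String) (out : String) : Decidable (Spec_get_node_class node_type out) := by unfold Spec_get_node_class; infer_instance

-- ===== CLAIM =====
def Claim_equal_get_node_class : Prop := ∀ (node_type : String), Dom_get_node_class node_type → Spec_get_node_class node_type (get_node_class node_type)

-- ===== LEMMAS AND PROOFS =====

-- all type strings either program can match
def allKnownTypes : List String :=
  SUBJECT_TYPES ++ LOCATION_TYPES ++ NEXUS_TYPES ++ NARRATIVE_TYPES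

set_option maxHeartbeats 1000000 in
theorem main_eq (nt : String) : get_node_class nt = get_node_class_alt nt := by
  by_cases h : nt ∈ allKnownTypes
  · fin_cases h <;> rfl
  · simp only [allKnownTypes, SUBJECT_TYPES, LOCATION_TYPES, NEXUS_TYPES, NARRATIVE_TYPES,
      PySem.Set.mem_ofList, List.mem_append, List.mem_cons, List.not_mem_nil, or_false,
      not_or] at h
    simp only [get_node_class, NODE_CLASSES, scanClasses, scanTypes, get_node_class_alt,
      SUBJECT_TYPES, LOCATION_TYPES, NEXUS_TYPES, NARRATIVE_TYPES, PySem.Set.mem_ofList,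
      List.mem_cons, List.not_mem_nil, or_false]
    simp only [h, or_self, if_false, beq_iff_eq]

-- ===== VERDICT =====
theorem get_node_class_spec : Claim_equal_get_node_class := by
  intro nt _
  unfold Spec_get_node_class
  exact main_eq nt
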